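-- pv_equiv track=rewrite | github.com/yeldmitrenko/iot-information_theory | lab6-hamming_code.py | generate_powers_of_two
-- ===== SOURCE A (Python) =====
-- def generate_powers_of_two(b_num):
--     p_val = 1
--     i = 0
--     result = []
--     while p_val < len(b_num):
--         result.append(2 ** i)
--         i += 1
--         p_val = 2 ** i
--     return result
-- ===== SOURCE B (Python) =====
-- def generate_powers_of_two(b_num):
--     count = max(len(b_num) - 1, 0).bit_length()
--     return [1 << i for i in range(count)]
-- ===== Notes on version B (the rewrite author's own statement) =====
-- stated objective: simpler
-- what changed: Replaces the doubling-and-compare while loop with a closed-form count of powers via (len-1).bit_length() and a single comprehension.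
import Mathlib
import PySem

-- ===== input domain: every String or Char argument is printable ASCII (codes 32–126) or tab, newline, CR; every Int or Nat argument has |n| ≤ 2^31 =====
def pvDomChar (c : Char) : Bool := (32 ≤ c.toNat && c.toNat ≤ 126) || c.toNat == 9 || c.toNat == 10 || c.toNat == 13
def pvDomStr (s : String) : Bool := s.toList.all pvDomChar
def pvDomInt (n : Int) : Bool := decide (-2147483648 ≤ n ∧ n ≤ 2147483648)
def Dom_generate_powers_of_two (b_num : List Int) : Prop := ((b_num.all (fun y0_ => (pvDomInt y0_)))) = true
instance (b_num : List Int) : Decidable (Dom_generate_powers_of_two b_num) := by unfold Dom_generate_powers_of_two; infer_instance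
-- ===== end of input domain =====

-- B replaces A's doubling while-loop by a closed-form power count (bit length of len-1); objective: simpler.


-- ===== PORT A =====
-- while p_val < len: result.append(2**i); i += 1; p_val = 2**i   (p_val = 2^i throughout)
def generate_powers_of_two_loop (n i : Nat) (result : List Int) : List Int :=
  if 2 ^ i < n then
    generate_powers_of_two_loop n (i + 1) (result ++ [(2 : Int) ^ i])
  else
    result
termination_by n - i
decreasing_by
  have h2 : i < 2 ^ i := Nat.lt_two_pow_self
  omega

def generate_powers_of_two (b_num : List Int) : List Int :=
  generate_powers_of_two_loop b_num.length 0 []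

-- ===== PORT B =====
-- count = max(len-1,0).bit_length(); [1 << i for i in range(count)]
def generate_powers_of_two_alt (b_num : List Int) : List Int :=
  (List.range (Nat.size (b_num.length - 1))).map (fun i => (2 : Int) ^ i)

-- ===== PRECONDITION & SPEC =====
def Spec_generate_powers_of_two (b_num : List Int) (out : List Int) : Prop := out = generate_powers_of_two_alt b_num
instance (b_num : List Int) (out : List Int) : Decidable (Spec_generate_powers_of_two b_num out) := by unfold Spec_generate_powers_of_two; infer_instance

-- ===== CLAIM (what is proved, stated in full; the proofs are below) =====
def Claim_equal_generate_powers_of_two : Prop := ∀ (b_num : List Int), Dom_generate_powers_of_two b_num → Spec_generate_powers_of_two b_num (generate_powers_of_two b_num)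

-- ===== LEMMAS AND PROOFS =====

-- 2^i < n iff i < size (n-1)
theorem pow_lt_iff_lt_size (n i : Nat) : 2 ^ i < n ↔ i < Nat.size (n - 1) := by
  have h1 : 1 ≤ 2 ^ i := Nat.one_le_two_pow
  constructor
  · intro h
    by_contra hc
    have hle : Nat.size (n - 1) ≤ i := by omega
    have := Nat.size_le.mp hle
    omega
  · intro h
    have hx : ¬ (n - 1 < 2 ^ i) := fun hx => absurd (Nat.size_le.mpr hx) (by omega)
    omega

theorem loop_eq (n : Nat) (i : Nat) (result : List Int) :
    generate_powers_of_two_loop n i result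
      = result ++ (List.range' i (Nat.size (n - 1) - i)).map (fun j => (2 : Int) ^ j) := by
  by_cases h : 2 ^ i < n
  · have hi : i < Nat.size (n - 1) := (pow_lt_iff_lt_size n i).mp h
    rw [generate_powers_of_two_loop, if_pos h, loop_eq n (i + 1)]
    have hs : Nat.size (n - 1) - i = (Nat.size (n - 1) - (i + 1)) + 1 := by omega
    rw [hs, List.range'_succ]
    simp
  · have hi : ¬ i < Nat.size (n - 1) := fun hc => h ((pow_lt_iff_lt_size n i).mpr hc)
    rw [generate_powers_of_two_loop, if_neg h]
    have : Nat.size (n - 1) - i = 0 := by omega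
    simp [this]
termination_by n - i
decreasing_by
  have h2 : i < 2 ^ i := Nat.lt_two_pow_self
  omega

-- ===== VERDICT (by name: the statement is the Claim_ definition above) =====
theorem generate_powers_of_two_spec : Claim_equal_generate_powers_of_two := by
  intro b_num _
  unfold Spec_generate_powers_of_two generate_powers_of_two generate_powers_of_two_alt
  rw [loop_eq]
  simp [List.range_eq_range']
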